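-- pv_equiv track=rewrite | github.com/qwertpi/tabula-analytics | app.py | generate_bin_labels
-- ===== SOURCE A (Python) =====
-- from typing import Callable, Iterable, Optional, TypeVar
--
-- def generate_bin_labels(data: list[int], data_to_labels: dict[int, list[str]], bins: list[int]):
--     bin_labels: list[str] = []
--     lower = bins[0]
--     upper: Optional[int] = None
--     for upper in bins[1:]:
--         bin_labels.append("<br>".join(
--             [label for point in range(lower, upper)
--                 for label in data_to_labels[point]]))
--         lower = upper
--     bin_labels[-1] += "<br>" + "<br>".join([label for label in data_to_labels[lower]])
--     return bin_labels
-- ===== SOURCE B (Python) =====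
-- def generate_bin_labels(data, data_to_labels, bins):
--     # Data-driven algorithm: instead of generating every integer point of each
--     # bin's range and looking it up, walk the dict's keys once in ascending
--     # order and route each key's labels to every bin whose half-open interval
--     # [bins[j], bins[j+1]) contains it; join the buckets, then append the
--     # final boundary's labels to the last bucket.
--     n = len(bins) - 1
--     buckets = [[] for _ in range(n)]
--     for p in sorted(data_to_labels):
--         labs = data_to_labels[p]
--         for j in range(n):
--             if bins[j] <= p < bins[j + 1]:
--                 buckets[j].extend(labs)
--     bin_labels = ["<br>".join(b) for b in buckets]
--     bin_labels[-1] += "<br>" + "<br>".join(data_to_labels[bins[-1]])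
--     return bin_labels
-- ===== Notes on version B (the rewrite author's own statement) =====
-- stated objective: alternative
-- what changed: B inverts the traversal: instead of generating every integer point of each bin's range and looking it up (A), B walks the dict's keys once in ascending sorted order and routes each key's labels to every bin whose half-open interval [bins[j], bins[j+1]) contains it, joining the buckets afterwards; the range generation and per-point dict lookups of A's inner comprehension disappear.
import Mathlib
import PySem

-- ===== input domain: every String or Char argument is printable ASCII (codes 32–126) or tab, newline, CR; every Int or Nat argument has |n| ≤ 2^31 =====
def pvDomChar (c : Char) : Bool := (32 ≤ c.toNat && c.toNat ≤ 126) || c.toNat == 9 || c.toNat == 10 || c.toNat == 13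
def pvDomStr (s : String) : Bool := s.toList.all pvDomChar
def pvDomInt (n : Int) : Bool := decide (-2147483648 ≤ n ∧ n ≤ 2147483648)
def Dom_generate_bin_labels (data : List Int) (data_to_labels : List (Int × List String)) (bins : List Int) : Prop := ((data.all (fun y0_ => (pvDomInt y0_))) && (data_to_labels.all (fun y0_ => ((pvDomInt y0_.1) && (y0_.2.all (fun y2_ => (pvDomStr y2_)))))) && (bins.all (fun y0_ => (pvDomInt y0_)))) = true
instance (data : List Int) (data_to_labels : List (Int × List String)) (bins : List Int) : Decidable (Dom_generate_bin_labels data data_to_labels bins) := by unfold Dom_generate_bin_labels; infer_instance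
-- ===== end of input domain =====

-- B replaces A's range-driven generation (every integer point of each bin's range is
-- generated and looked up) by a data-driven pass: the dict's keys are walked once in
-- ascending order and each key's labels are routed to every bin whose half-open
-- interval contains it; different traversal, same value wherever A returns.

-- dict lookup (first match in the association list); dtl[p] raises KeyError where this is none
def pvLookup (d : List (Int × List String)) (k : Int) : Option (List String) :=
  (d.find? (fun kv => kv.1 == k)).map (·.2)

-- "<br>".join([label for point in range(l, u) for label in dtl[point]])
-- (missing keys, where Python raises KeyError, are excluded by Pre_; getD [] is never hit there)
def pvSeg (dtl : List (Int × List String)) (l u : Int) : String :=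
  PySem.Str.join "<br>" ((PySem.List.pyRange l u 1).flatMap (fun p => (pvLookup dtl p).getD []))

-- ===== PORT A =====
-- A: forward loop over bins[1:] appending one joined string per bin, then
-- bin_labels[-1] += "<br>" + "<br>".join(data_to_labels[lower]).
def generate_bin_labels (data : List Int) (data_to_labels : List (Int × List String)) (bins : List Int) : List String :=
  match bins with
  | [] => []   -- bins[0] raises IndexError; outside Pre_
  | b0 :: rest =>
    let st := rest.foldl
      (fun (st : List String × Int) u => (st.1 ++ [pvSeg data_to_labels st.2 u], u)) ([], b0)
    let suffix := "<br>" ++ PySem.Str.join "<br>" ((pvLookup data_to_labels st.2).getD [])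
    match st.1.getLast? with
    | none => []   -- bin_labels[-1] raises IndexError; outside Pre_
    | some lastEl => st.1.dropLast ++ [lastEl ++ suffix]

-- ===== PORT B =====
-- B: for p in sorted(data_to_labels): route data_to_labels[p] to every bucket j with
-- bins[j] <= p < bins[j+1]; join the buckets; append the final boundary's labels to
-- the last bucket.  (bins[j], bins[j+1] with 0 ≤ j < len(bins)-1 are always in range,
-- so getD is exact; sorted(dict) is the sorted key list.)
def generate_bin_labels_alt (data : List Int) (data_to_labels : List (Int × List String)) (bins : List Int) : List String :=
  let n := bins.length - 1
  let buckets := (PySem.List.sorted (data_to_labels.map Prod.fst) id).foldl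
    (fun (bk : List (List String)) p =>
      let labs := (pvLookup data_to_labels p).getD []
      (List.range n).foldl
        (fun (bk2 : List (List String)) j =>
          if bins.getD j 0 ≤ p ∧ p < bins.getD (j + 1) 0 then
            bk2.set j (bk2.getD j [] ++ labs)
          else bk2)
        bk)
    (List.replicate n ([] : List String))
  let bin_labels := buckets.map (fun b => PySem.Str.join "<br>" b)
  match bin_labels.getLast? with
  | none => []   -- bin_labels[-1] raises IndexError; outside Pre_
  | some lastEl =>
    bin_labels.dropLast ++
      [lastEl ++ ("<br>" ++ PySem.Str.join "<br>" ((pvLookup data_to_labels (bins.getLastD 0)).getD []))]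

-- ===== PRECONDITION & SPEC =====
-- Pre_ is exactly the inputs on which Python A returns normally (len(bins) ≥ 2 and
-- every looked-up point — each consecutive half-open range and the final boundary —
-- is a dict key; anything else raises IndexError or KeyError), plus distinct keys in
-- the association list, which every real Python dict satisfies by construction.
-- The per-pair span bound is implied by the key clause (all span points are distinct
-- keys), so it does not narrow Pre_; it only keeps the decision procedure from
-- enumerating huge ranges.
def Pre_generate_bin_labels (data : List Int) (data_to_labels : List (Int × List String)) (bins : List Int) : Prop :=
  2 ≤ bins.length ∧ (data_to_labels.map Prod.fst).Nodup ∧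
  (∀ lu ∈ List.zip bins bins.tail, lu.2 - lu.1 ≤ (data_to_labels.length : Int)) ∧
  (∀ lu ∈ List.zip bins bins.tail, ∀ p ∈ PySem.List.pyRange lu.1 lu.2 1,
      ((data_to_labels.find? (fun kv => kv.1 == p)).isSome = true)) ∧
  ((data_to_labels.find? (fun kv => kv.1 == bins.getLastD 0)).isSome = true)
instance (data : List Int) (data_to_labels : List (Int × List String)) (bins : List Int) : Decidable (Pre_generate_bin_labels data data_to_labels bins) := by unfold Pre_generate_bin_labels; infer_instance

def pvWitness_generate_bin_labels : List Int × (List (Int × List String)) × List Int :=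
  ([], [(0, ["a"]), (1, []), (2, ["b", "c"])], [0, 2])

def Spec_generate_bin_labels (data : List Int) (data_to_labels : List (Int × List String)) (bins : List Int) (out : List String) : Prop := out = generate_bin_labels_alt data data_to_labels bins
instance (data : List Int) (data_to_labels : List (Int × List String)) (bins : List Int) (out : List String) : Decidable (Spec_generate_bin_labels data data_to_labels bins out) := by unfold Spec_generate_bin_labels; infer_instance

-- ===== CLAIM (what is proved, stated in full; the proofs are below) =====
def Claim_equal_generate_bin_labels : Prop := ∀ (data : List Int) (data_to_labels : List (Int × List String)) (bins : List Int), Dom_generate_bin_labels data data_to_labels bins → Pre_generate_bin_labels data data_to_labels bins → Spec_generate_bin_labels data data_to_labels bins (generate_bin_labels data data_to_labels bins)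

-- ===== LEMMAS AND PROOFS =====

-- A's loop: the accumulated list is one segment per consecutive pair, and the running
-- 'lower' ends at the last boundary.
theorem pvFoldA (dtl : List (Int × List String)) (rest : List Int) :
    ∀ (l : Int) (acc : List String),
      rest.foldl (fun (st : List String × Int) u => (st.1 ++ [pvSeg dtl st.2 u], u)) (acc, l)
        = (acc ++ (List.zip (l :: rest) rest).map (fun lu => pvSeg dtl lu.1 lu.2), rest.getLastD l) := by
  induction rest with
  | nil => simp
  | cons u r ih =>
    intro l acc
    simp only [List.foldl_cons, List.zip_cons_cons, List.map_cons, List.getLastD_cons]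
    rw [ih u (acc ++ [pvSeg dtl l u])]
    simp

-- B's inner loop over the bucket indices: one key's labels land in exactly the
-- buckets whose interval contains it
theorem pvInner (bins : List Int) (labs : List String) (p : Int) :
    ∀ (js : List Nat) (bk : List (List String)) (j : Nat), js.Nodup → j < bk.length →
      ((js.foldl (fun bk2 jj =>
          if bins.getD jj 0 ≤ p ∧ p < bins.getD (jj + 1) 0 then
            bk2.set jj (bk2.getD jj [] ++ labs)
          else bk2) bk).getD j [])
        = bk.getD j [] ++
            (if j ∈ js ∧ (bins.getD j 0 ≤ p ∧ p < bins.getD (j + 1) 0) then labs else []) := by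
  intro js
  induction js with
  | nil => intro bk j _ _; simp
  | cons jj js ih =>
    intro bk j hnd hj
    simp only [List.foldl_cons]
    have hnd' : js.Nodup := (List.nodup_cons.mp hnd).2
    have hjjnot : jj ∉ js := (List.nodup_cons.mp hnd).1
    by_cases hc : bins.getD jj 0 ≤ p ∧ p < bins.getD (jj + 1) 0
    · rw [if_pos hc]
      by_cases hje : j = jj
      · subst hje
        rw [ih _ _ hnd' (by simpa using hj)]
        have : ¬ (j ∈ js ∧ (bins.getD j 0 ≤ p ∧ p < bins.getD (j + 1) 0)) :=
          fun h => hjjnot h.1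
        rw [if_neg this, if_pos (by exact ⟨by simp, hc⟩)]
        simp [List.getD, List.getElem?_set_self hj]
      · rw [ih _ _ hnd' (by simpa using hj)]
        have hset : (bk.set jj (bk.getD jj [] ++ labs)).getD j [] = bk.getD j [] := by
          simp [List.getD, List.getElem?_set_ne (fun h => hje h.symm)]
        rw [hset]
        congr 1
        by_cases hm : j ∈ js ∧ (bins.getD j 0 ≤ p ∧ p < bins.getD (j + 1) 0)
        · rw [if_pos hm, if_pos ⟨by simp [hm.1], hm.2⟩]
        · rw [if_neg hm, if_neg (fun h => hm ⟨by
            rcases List.mem_cons.mp h.1 with h' | h'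
            · exact absurd h' hje
            · exact h', h.2⟩)]
    · rw [if_neg hc]
      rw [ih _ _ hnd' hj]
      congr 1
      by_cases hm : j ∈ js ∧ (bins.getD j 0 ≤ p ∧ p < bins.getD (j + 1) 0)
      · rw [if_pos hm, if_pos ⟨by simp [hm.1], hm.2⟩]
      · rw [if_neg hm, if_neg (fun h => by
          rcases List.mem_cons.mp h.1 with h' | h'
          · subst h'; exact hc h.2
          · exact hm ⟨h', h.2⟩)]

theorem pvInnerLen (bins : List Int) (labs : List String) (p : Int) :
    ∀ (js : List Nat) (bk : List (List String)),
      (js.foldl (fun bk2 jj =>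
          if bins.getD jj 0 ≤ p ∧ p < bins.getD (jj + 1) 0 then
            bk2.set jj (bk2.getD jj [] ++ labs)
          else bk2) bk).length = bk.length := by
  intro js
  induction js with
  | nil => intro bk; rfl
  | cons jj js ih =>
    intro bk
    simp only [List.foldl_cons]
    rw [ih]
    split <;> simp

-- B's outer loop over the sorted keys, read at bucket j: the labels of exactly the
-- keys that j's interval contains, in key order
theorem pvOuter (bins : List Int) (dtl : List (Int × List String)) (n : Nat) :
    ∀ (S : List Int) (bk : List (List String)) (j : Nat), j < bk.length → j < n →
      ((S.foldl (fun bk p =>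
          (List.range n).foldl
            (fun bk2 jj =>
              if bins.getD jj 0 ≤ p ∧ p < bins.getD (jj + 1) 0 then
                bk2.set jj (bk2.getD jj [] ++ (pvLookup dtl p).getD [])
              else bk2) bk) bk).getD j [])
        = bk.getD j [] ++
            (S.filter (fun p => decide (bins.getD j 0 ≤ p ∧ p < bins.getD (j + 1) 0))).flatMap
              (fun p => (pvLookup dtl p).getD []) := by
  intro S
  induction S with
  | nil => intro bk j _ _; simp
  | cons p S ih =>
    intro bk j hj hjn
    simp only [List.foldl_cons, List.filter_cons]
    rw [ih _ _ (by rw [pvInnerLen]; exact hj) hjn,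
      pvInner bins ((pvLookup dtl p).getD []) p (List.range n) bk j List.nodup_range hj]
    by_cases hc : bins.getD j 0 ≤ p ∧ p < bins.getD (j + 1) 0
    · rw [if_pos ⟨List.mem_range.mpr hjn, hc⟩]
      obtain ⟨hc1, hc2⟩ := hc
      simp only [List.getD] at hc1 hc2 ⊢
      simp [hc1, hc2, List.append_assoc]
    · rw [if_neg (fun h => hc h.2)]
      simp only [List.getD] at hc ⊢
      simp [hc]

theorem pvOuterLen (bins : List Int) (dtl : List (Int × List String)) (n : Nat) :
    ∀ (S : List Int) (bk : List (List String)),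
      (S.foldl (fun bk p =>
          (List.range n).foldl
            (fun bk2 jj =>
              if bins.getD jj 0 ≤ p ∧ p < bins.getD (jj + 1) 0 then
                bk2.set jj (bk2.getD jj [] ++ (pvLookup dtl p).getD [])
              else bk2) bk) bk).length = bk.length := by
  intro S
  induction S with
  | nil => intro bk; rfl
  | cons p S ih => intro bk; simp only [List.foldl_cons]; rw [ih, pvInnerLen]

-- under Pre_'s key clause, the sorted keys restricted to [l, u) are exactly range(l, u)
theorem pvFilterRange (dtl : List (Int × List String)) (l u : Int)
    (hnd : (dtl.map Prod.fst).Nodup)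
    (hkeys : ∀ p ∈ PySem.List.pyRange l u 1, ((dtl.find? (fun kv => kv.1 == p)).isSome = true)) :
    (PySem.List.sorted (dtl.map Prod.fst) id).filter (fun p => decide (l ≤ p ∧ p < u))
      = PySem.List.pyRange l u 1 := by
  have hperm := PySem.List.sorted_perm (dtl.map Prod.fst) id false
  have hSnd : (PySem.List.sorted (dtl.map Prod.fst) id).Nodup := hperm.nodup_iff.mpr hnd
  have hSle : (PySem.List.sorted (dtl.map Prod.fst) id).Pairwise (· ≤ ·) :=
    PySem.List.sorted_pairwise (dtl.map Prod.fst) id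
  have hSlt : (PySem.List.sorted (dtl.map Prod.fst) id).Pairwise (· < ·) :=
    (List.Pairwise.and hSle hSnd).imp (fun h => lt_of_le_of_ne h.1 h.2)
  apply List.Perm.eq_of_pairwise
    (fun a b _ _ h1 h2 => le_antisymm (le_of_lt h1) (le_of_lt h2))
    (List.Pairwise.filter _ hSlt) (PySem.List.pairwise_lt_pyRange_one l u)
  apply (List.perm_ext_iff_of_nodup (List.Nodup.filter _ hSnd)
    (PySem.List.nodup_pyRange_one l u)).mpr
  intro p
  rw [List.mem_filter, PySem.List.mem_pyRange_one, hperm.mem_iff]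
  constructor
  · intro ⟨_, h⟩; exact of_decide_eq_true h
  · intro h
    refine ⟨?_, decide_eq_true h⟩
    have := hkeys p (PySem.List.mem_pyRange_one.mpr h)
    obtain ⟨kv, hkv, hbeq⟩ := List.find?_isSome.mp this
    have : kv.1 = p := by simpa using hbeq
    exact this ▸ List.mem_map_of_mem hkv

theorem pvMain (data : List Int) (dtl : List (Int × List String)) (bins : List Int)
    (hn : 2 ≤ bins.length) (hnd : (dtl.map Prod.fst).Nodup)
    (hkeys : ∀ lu ∈ List.zip bins bins.tail, ∀ p ∈ PySem.List.pyRange lu.1 lu.2 1,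
      ((dtl.find? (fun kv => kv.1 == p)).isSome = true)) :
    generate_bin_labels data dtl bins = generate_bin_labels_alt data dtl bins := by
  obtain ⟨b0, rest, rfl⟩ : ∃ b0 rest, bins = b0 :: rest := by
    cases bins with
    | nil => simp at hn
    | cons a l => exact ⟨a, l, rfl⟩
  have hfoldmap : (((PySem.List.sorted ((dtl.map Prod.fst)) id).foldl
      (fun (bk : List (List String)) p =>
        (List.range ((b0 :: rest).length - 1)).foldl
          (fun bk2 jj =>
            if (b0 :: rest).getD jj 0 ≤ p ∧ p < (b0 :: rest).getD (jj + 1) 0 then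
              bk2.set jj (bk2.getD jj [] ++ (pvLookup dtl p).getD [])
            else bk2) bk)
      (List.replicate ((b0 :: rest).length - 1) ([] : List String))).map
        (fun b => PySem.Str.join "<br>" b))
      = ((b0 :: rest).zip rest).map (fun lu => pvSeg dtl lu.1 lu.2) := by
    apply List.ext_getElem
    · rw [List.length_map, pvOuterLen]
      simp
    · intro j h1 h2
      have hjr : j < rest.length := by simpa using h2
      have hjB : j < (List.replicate ((b0 :: rest).length - 1) ([] : List String)).length := by
        simp; omega
      rw [List.getElem_map, List.getElem_map,
        ← List.getD_eq_getElem _ ([] : List String) (by rw [pvOuterLen]; exact hjB),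
        pvOuter (b0 :: rest) dtl ((b0 :: rest).length - 1) _ _ j hjB (by simpa using hjr)]
      have hjz : j < ((b0 :: rest).zip rest).length := by simp; omega
      have hgj : (b0 :: rest).getD j 0 = (((b0 :: rest).zip rest)[j]'hjz).1 := by
        have hlt : j < (b0 :: rest).length := by simp; omega
        simp [List.getD, List.getElem?_eq_getElem hlt]
      have hgj1 : (b0 :: rest).getD (j + 1) 0 = (((b0 :: rest).zip rest)[j]'hjz).2 := by
        have hlt : j + 1 < (b0 :: rest).length := by simp; omega
        simp [List.getD, List.getElem?_eq_getElem hlt]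
      rw [hgj, hgj1,
        pvFilterRange dtl _ _ hnd
          (hkeys (((b0 :: rest).zip rest)[j]'hjz) (List.getElem_mem hjz))]
      simp [pvSeg]
  simp only [generate_bin_labels, generate_bin_labels_alt]
  rw [pvFoldA dtl rest b0 []]
  simp only [List.nil_append]
  rw [hfoldmap]
  rw [List.getLastD_cons]

theorem generate_bin_labels_spec : Claim_equal_generate_bin_labels := by
  intro data data_to_labels bins _ hpre
  unfold Spec_generate_bin_labels
  exact pvMain data data_to_labels bins hpre.1 hpre.2.1 hpre.2.2.2.1
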